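-- pv_equiv track=rewrite | github.com/mike-tr/HebrewPy | HePyL.py | extended_split
-- ===== SOURCE A (Python) =====
-- operations = ["+", "-", "*", "/", "==", "!=", "או",
--               "וגם", "<=", ">=", "<", ">", ",", "=", "(", ")", ")"]
--
-- def find_split(word, symbols: list):
--     words = []
--     ln = len(symbols) - 1
--
--     def fs(word, current):
--         symbol = symbols[current]
--         x = word.find(symbol)
--         while x >= 0:
--             if current >= ln:
--                 words.append(word[: x])
--             else:
--                 fs(word[: x], current + 1)
--                 words.append("$" + symbol)
--             word = word[x + len(symbol):]
--             x = word.find(symbol)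
--
--         if(len(word) > 0):
--             if current >= ln:
--                 words.append(word)
--             else:
--                 fs(word, current + 1)
--
--     fs(word, 0)
--     return words
--
-- def extended_split(vec: list):
--     arr = []
--     for word in vec:
--         if word[0] == "\"":
--             arr.append(word)
--             continue
--         arr += find_split(word, operations)
--     return arr
-- ===== SOURCE B (Python) =====
-- operations = ["+", "-", "*", "/", "==", "!=", "או",
--               "וגם", "<=", ">=", "<", ">", ",", "=", "(", ")", ")"]
--
-- def _pieces(text, op):
--     parts = text.split(op)
--     out = [(False, parts[0])]
--     for p in parts[1:]:
--         out.append((True, op))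
--         out.append((False, p))
--     return out
--
-- def extended_split(vec: list):
--     arr = []
--     for word in vec:
--         if word[0] == "\"":
--             arr.append(word)
--             continue
--         items = [(False, word)]
--         for op in operations:
--             items = [x for it in items for x in ([it] if it[0] else _pieces(it[1], op))]
--         arr += ["$" + t if is_op else t for is_op, t in items if is_op or t]
--     return arr
-- ===== Notes on version B (the rewrite author's own statement) =====
-- stated objective: simpler
-- what changed: A's nested recursive-descent splitter (a closure recursing over operator indices with an inner find/slice while-loop per segment) is replaced by a flat worklist: one pass per operator over a token list using str.split, then a single rendering step.
import Mathlib
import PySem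

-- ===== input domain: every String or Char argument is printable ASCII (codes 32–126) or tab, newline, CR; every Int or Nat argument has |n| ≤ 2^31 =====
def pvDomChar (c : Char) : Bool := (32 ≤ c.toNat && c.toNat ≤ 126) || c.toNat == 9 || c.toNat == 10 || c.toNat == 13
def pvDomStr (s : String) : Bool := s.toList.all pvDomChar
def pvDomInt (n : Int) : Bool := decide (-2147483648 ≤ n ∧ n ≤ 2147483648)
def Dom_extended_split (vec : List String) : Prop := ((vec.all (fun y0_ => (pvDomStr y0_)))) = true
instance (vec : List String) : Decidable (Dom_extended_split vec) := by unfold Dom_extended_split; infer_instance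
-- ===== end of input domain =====

-- B replaces A's recursive-descent splitter by iterative per-operator splitting passes
-- over a flat token worklist (objective: simpler); same return value, no mutation.

-- the module constant `operations` (shared by A and B, as in the Python module)
def pvOperations : List String := ["+", "-", "*", "/", "==", "!=", "או",
    "וגם", "<=", ">=", "<", ">", ",", "=", "(", ")", ")"]

-- ===== PORT A =====
-- fs(word, current): the inner closure; `current` is carried as the suffix sym::rest of
-- `symbols` (`current >= ln` is `rest = []`); `fsRest` is fs at current+1.
-- `sym = []` guard: Python would loop forever on an empty symbol (never happens: the
-- operations are all nonempty); it only makes the recursion total.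
def pvFsLoop (sym : List Char) (last : Bool) (fsRest : List Char → List String → List String)
    (word : List Char) (words : List String) : List String :=
  if _hsym : sym = [] then words
  else
    let x := PySem.Chars.find word sym
    if hx : 0 ≤ x then
      pvFsLoop sym last fsRest (PySem.Chars.slice word (some (x + PySem.Chars.len sym)) none)
        (if last then words ++ [String.ofList (PySem.Chars.slice word none (some x))]
         else fsRest (PySem.Chars.slice word none (some x)) words ++ [String.ofList ('$' :: sym)])
    else
      if word.length > 0 then
        (if last then words ++ [String.ofList word] else fsRest word words)
      else words
termination_by word.length
decreasing_by
  have hinf : sym <:+: word := (PySem.Chars.find_nonneg_iff word sym).mp hx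
  have h1 : 1 ≤ sym.length := List.length_pos_iff.mpr _hsym
  have h2 : sym.length ≤ word.length := hinf.length_le
  have h0 : (0:Int) ≤ x + PySem.Chars.len sym := by
    have : (PySem.Chars.len sym : Int) = sym.length := by simp [PySem.Chars.len_eq]
    omega
  rw [PySem.Chars.slice_eq_listSlice, PySem.List.slice_from _ h0]
  have : (PySem.Chars.len sym : Int) = sym.length := by simp [PySem.Chars.len_eq]
  simp only [List.length_drop]
  omega

def pvFs : List String → List Char → List String → List String
  | [], _, words => words    -- unreachable: Python's symbols[current] always exists here
  | sym :: rest, word, words => pvFsLoop sym.toList (rest = []) (fun w ws => pvFs rest w ws) word words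

def find_split (word : String) (symbols : List String) : List String :=
  pvFs symbols word.toList []

def extended_split (vec : List String) : List String :=
  vec.foldl (fun arr word =>
    match PySem.Str.pyGet? word 0 with
    | none => arr            -- Python raises IndexError on an empty word (excluded by Pre_)
    | some c => if c = '"' then arr ++ [word] else arr ++ find_split word pvOperations) []

-- ===== PORT B =====
-- _pieces(text, op): split text by op, interleaving operator tokens
def pvPieces (text : List Char) (op : String) : List (Bool × List Char) :=
  match PySem.Chars.splitOn text op.toList with
  | [] => []                 -- unreachable: str.split never returns an empty list
  | p :: ps => ps.foldl (fun out q => out ++ [(true, op.toList), (false, q)]) [(false, p)]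

-- one pass of the worklist: op tokens kept, text segments split
def pvPass (items : List (Bool × List Char)) (op : String) : List (Bool × List Char) :=
  items.flatMap (fun it => if it.1 then [it] else pvPieces it.2 op)

-- final rendering: "$"+op for operator tokens, nonempty text segments verbatim
def pvRender (items : List (Bool × List Char)) : List String :=
  items.filterMap (fun it =>
    if it.1 then some (String.ofList ('$' :: it.2))
    else if it.2 = [] then none else some (String.ofList it.2))

def extended_split_alt (vec : List String) : List String :=
  vec.foldl (fun arr word =>
    match PySem.Str.pyGet? word 0 with
    | none => arr            -- Python raises IndexError on an empty word (excluded by Pre_)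
    | some c => if c = '"' then arr ++ [word]
      else arr ++ pvRender (pvOperations.foldl pvPass [(false, word.toList)])) []

-- ===== PRECONDITION & SPEC =====
-- Pre_ excludes exactly the vectors containing an empty word, on which A's word[0] raises IndexError.
def Pre_extended_split (vec : List String) : Prop := ∀ w ∈ vec, w ≠ ""
instance (vec : List String) : Decidable (Pre_extended_split vec) := by unfold Pre_extended_split; infer_instance
def pvWitness_extended_split : List String := ["a+b", "\"x=y\"", "(u,v)<=w"]

def Spec_extended_split (vec : List String) (out : List String) : Prop := out = extended_split_alt vec
instance (vec : List String) (out : List String) : Decidable (Spec_extended_split vec out) := by unfold Spec_extended_split; infer_instance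

-- ===== CLAIM (what is proved, stated in full; the proofs are below) =====
def Claim_equal_extended_split : Prop := ∀ (vec : List String), Dom_extended_split vec → Pre_extended_split vec → Spec_extended_split vec (extended_split vec)

-- ===== LEMMAS AND PROOFS =====

-- reference decomposition: the list of sep-separated parts (Python text.split(sep))
def myParts (sep : List Char) (l : List Char) : List (List Char) :=
  if _h : sep = [] then [l]
  else
    let x := PySem.Chars.find l sep
    if hx : 0 ≤ x then
      l.take x.toNat :: myParts sep (l.drop (x.toNat + sep.length))
    else [l]
termination_by l.length
decreasing_by
  have hinf : sep <:+: l := (PySem.Chars.find_nonneg_iff l sep).mp hx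
  have h1 : 1 ≤ sep.length := List.length_pos_iff.mpr _h
  have h2 : sep.length ≤ l.length := hinf.length_le
  simp only [List.length_drop]; omega


-- ---- generic facts about PySem.Chars.find / splitOn ----

theorem pv_find_go_shift (sub : List Char) : ∀ (l : List Char) (k : Nat),
    PySem.Chars.find.go sub l k =
      if PySem.Chars.find.go sub l 0 = -1 then -1 else PySem.Chars.find.go sub l 0 + k := by
  intro l
  induction l with
  | nil =>
    intro k
    rw [PySem.Chars.find.go, PySem.Chars.find.go]
    by_cases h : sub.isEmpty <;> simp [h]
  | cons c rest ih =>
    have e : ∀ (m : Nat), PySem.Chars.find.go sub (c :: rest) m =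
        if sub.isPrefixOf (c :: rest) then (m : Int) else PySem.Chars.find.go sub rest (m + 1) := by
      intro m; rw [PySem.Chars.find.go]
    intro k
    rw [e k, e 0]
    by_cases h : sub.isPrefixOf (c :: rest)
    · simp [h]
    · simp only [h, if_false, Bool.false_eq_true]
      rw [ih (0 + 1), ih (k + 1)]
      have hge : -1 ≤ PySem.Chars.find.go sub rest 0 := PySem.Chars.neg_one_le_find rest sub
      split_ifs <;> omega

theorem pv_find_nil (sub : List Char) (hsub : sub ≠ []) : PySem.Chars.find [] sub = -1 := by
  rw [PySem.Chars.find, PySem.Chars.find.go]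
  simp [List.isEmpty_iff, hsub]

theorem pv_find_cons (sub : List Char) (c : Char) (rest : List Char)
    (h : ¬ sub.isPrefixOf (c :: rest) = true) :
    PySem.Chars.find (c :: rest) sub =
      if PySem.Chars.find rest sub = -1 then -1 else PySem.Chars.find rest sub + 1 := by
  rw [PySem.Chars.find, PySem.Chars.find.go]
  simp only [h, if_false, Bool.false_eq_true]
  rw [pv_find_go_shift sub rest 1, PySem.Chars.find]
  split_ifs <;> simp_all

theorem pv_myParts_ne_nil (sep l : List Char) : myParts sep l ≠ [] := by
  intro hcon
  rw [myParts] at hcon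
  by_cases h : sep = []
  · simp [h] at hcon
  · by_cases hx : 0 ≤ PySem.Chars.find l sep <;> simp [h, hx] at hcon

theorem pv_myParts_nil (sep : List Char) (hsep : sep ≠ []) : myParts sep [] = [[]] := by
  rw [myParts]
  simp [hsep, pv_find_nil sep hsep]

theorem pv_myParts_pos (sep l : List Char) (hsep : sep ≠ []) (hx : 0 ≤ PySem.Chars.find l sep) :
    myParts sep l = l.take (PySem.Chars.find l sep).toNat ::
      myParts sep (l.drop ((PySem.Chars.find l sep).toNat + sep.length)) := by
  rw [myParts]; simp [hsep, hx]

theorem pv_myParts_neg (sep l : List Char) (hsep : sep ≠ []) (hx : ¬ 0 ≤ PySem.Chars.find l sep) :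
    myParts sep l = [l] := by
  rw [myParts]; simp [hsep, hx]

-- myParts commutes with cons when sep is not a prefix
theorem pv_myParts_cons' (sep : List Char) (hsep : sep ≠ []) (c : Char) (rest : List Char)
    (h : ¬ sep.isPrefixOf (c :: rest) = true) :
    myParts sep (c :: rest) = (myParts sep rest).modifyHead (fun p => c :: p) := by
  have hc := pv_find_cons sep c rest h
  by_cases hr : 0 ≤ PySem.Chars.find rest sep
  · have hne : PySem.Chars.find rest sep ≠ -1 := by omega
    have hx : PySem.Chars.find (c :: rest) sep = PySem.Chars.find rest sep + 1 := by
      rw [hc]; simp [hne]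
    have h0 : 0 ≤ PySem.Chars.find (c :: rest) sep := by omega
    rw [pv_myParts_pos sep _ hsep h0, pv_myParts_pos sep rest hsep hr, hx]
    have ht : (PySem.Chars.find rest sep + 1).toNat = (PySem.Chars.find rest sep).toNat + 1 := by omega
    have hd : (PySem.Chars.find rest sep).toNat + 1 + sep.length
        = ((PySem.Chars.find rest sep).toNat + sep.length) + 1 := by omega
    simp only [ht, hd, List.drop_succ_cons, List.take_succ_cons, List.modifyHead]
  · have heq : PySem.Chars.find rest sep = -1 := by
      have := PySem.Chars.neg_one_le_find rest sep; omega
    have hx : PySem.Chars.find (c :: rest) sep = -1 := by rw [hc]; simp [heq]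
    rw [pv_myParts_neg sep _ hsep (by omega), pv_myParts_neg sep rest hsep (by omega)]
    simp [List.modifyHead]

-- splitOn computes myParts
theorem pv_splitOn_go (sep : List Char) (hsep : sep ≠ []) :
    ∀ (fuel : Nat) (l : List Char), l.length < fuel → ∀ (cur : List Char) (acc : List (List Char)),
      PySem.Chars.splitOn.go sep fuel l cur acc =
        acc.reverse ++ (myParts sep l).modifyHead (fun p => cur.reverse ++ p) := by
  intro fuel
  induction fuel with
  | zero => intro l hl; omega
  | succ n ih =>
    intro l hl cur acc
    match l with
    | [] =>
      rw [PySem.Chars.splitOn.go.eq_2 _ _ _ _ (by omega), pv_myParts_nil sep hsep]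
      simp
    | c :: rest =>
      rw [PySem.Chars.splitOn.go.eq_3]
      by_cases h : sep.isPrefixOf (c :: rest)
      · simp only [h, if_true]
        have hlen : 1 ≤ sep.length := List.length_pos_iff.mpr hsep
        have hlen2 : sep.length ≤ (c :: rest).length := (List.IsPrefix.length_le (List.isPrefixOf_iff_prefix.mp h))
        rw [ih (List.drop sep.length (c :: rest)) (by simp at hl ⊢; omega)]
        have hfind : PySem.Chars.find (c :: rest) sep = 0 := by
          rw [PySem.Chars.find, PySem.Chars.find.go]
          simp [h]
        rw [pv_myParts_pos sep (c :: rest) hsep (by rw [hfind]), hfind]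
        simp [List.modifyHead]
        rcases myParts sep (List.drop sep.length (c :: rest)) with _ | ⟨q, qs⟩ <;> rfl
      · simp only [h, if_false, Bool.false_eq_true]
        rw [ih rest (by simp at hl ⊢; omega)]
        rw [pv_myParts_cons' sep hsep c rest (by simp [h])]
        rcases hmp : myParts sep rest with _ | ⟨p, ps⟩
        · exact absurd hmp (pv_myParts_ne_nil sep rest)
        · simp [List.modifyHead]

theorem pv_splitOn_eq_myParts (sep l : List Char) (hsep : sep ≠ []) :
    PySem.Chars.splitOn l sep = myParts sep l := by
  rw [PySem.Chars.splitOn, pv_splitOn_go sep hsep (l.length + 1) l (by omega) [] []]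
  rcases hmp : myParts sep l with _ | ⟨p, ps⟩
  · exact absurd hmp (pv_myParts_ne_nil sep l)
  · simp [List.modifyHead]

-- the prefix of l before the first occurrence of sep is sep-free
theorem pv_take_find_free (sep l : List Char) (hsep : sep ≠ [])
    (hx : 0 ≤ PySem.Chars.find l sep) :
    ¬ sep <:+: l.take (PySem.Chars.find l sep).toNat := by
  intro hinf
  obtain ⟨j, hj⟩ := (PySem.Chars.exists_prefix_drop_iff_isIn sep _).mpr
    ((PySem.Chars.isIn_iff_infix sep _).mpr hinf)
  rw [List.drop_take] at hj
  obtain ⟨hpre, hlen⟩ := (List.prefix_take_iff).mp hj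
  have h1 : 1 ≤ sep.length := List.length_pos_iff.mpr hsep
  have hmin := (PySem.Chars.find_spec hx).2 j (by omega)
  exact hmin hpre

-- ---- B-side algebra: passes distribute over the worklist ----

def interTokL (symL : List Char) (f : List Char → List String) : List (List Char) → List String
  | [] => []
  | p :: ps => f p ++ ps.flatMap (fun q => String.ofList ('$' :: symL) :: f q)

def pvG (syms : List String) (w : List Char) : List String :=
  pvRender (syms.foldl pvPass [(false, w)])

theorem pv_pass_append (i1 i2 : List (Bool × List Char)) (op : String) :
    pvPass (i1 ++ i2) op = pvPass i1 op ++ pvPass i2 op := by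
  simp [pvPass]

theorem pv_foldPass_nil (syms : List String) : syms.foldl pvPass [] = [] := by
  induction syms with
  | nil => rfl
  | cons op rest ih => simpa [pvPass] using ih

theorem pv_foldPass_append (syms : List String) :
    ∀ i1 i2, syms.foldl pvPass (i1 ++ i2) = syms.foldl pvPass i1 ++ syms.foldl pvPass i2 := by
  induction syms with
  | nil => intro i1 i2; rfl
  | cons op rest ih =>
    intro i1 i2
    simp only [List.foldl_cons, pv_pass_append, ih]

theorem pv_foldPass_true (syms : List String) (t : List Char) :
    syms.foldl pvPass [(true, t)] = [(true, t)] := by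
  induction syms with
  | nil => rfl
  | cons op rest ih => simpa [pvPass] using ih

theorem pv_pieces_eq (w : List Char) (op : String) (hop : op.toList ≠ [])
    (p : List Char) (ps : List (List Char)) (h : myParts op.toList w = p :: ps) :
    pvPieces w op = (false, p) :: ps.flatMap (fun q => [(true, op.toList), (false, q)]) := by
  rw [pvPieces, pv_splitOn_eq_myParts op.toList w hop, h]
  simpa using PySem.List.foldl_append_eq_flatMap
    (fun q => [(true, op.toList), (false, q)]) ps [(false, p)]

theorem pv_render_append (i1 i2 : List (Bool × List Char)) :
    pvRender (i1 ++ i2) = pvRender i1 ++ pvRender i2 := by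
  simp [pvRender]

theorem pv_G_nil (syms : List String) (hne : ∀ s ∈ syms, s.toList ≠ []) : pvG syms [] = [] := by
  induction syms with
  | nil => rfl
  | cons op rest ih =>
    have hop : op.toList ≠ [] := hne op (List.mem_cons_self)
    have hmp : myParts op.toList [] = [[]] := pv_myParts_nil op.toList hop
    have hp : pvPass [(false, ([] : List Char))] op = [(false, ([] : List Char))] := by
      simp [pvPass, pv_pieces_eq [] op hop [] [] hmp]
    unfold pvG at ih ⊢
    simp only [List.foldl_cons, hp]
    exact ih (fun s hs => hne s (List.mem_cons_of_mem _ hs))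

theorem pv_fold_flat (rest : List String) (opL : List Char) (ps : List (List Char)) :
    rest.foldl pvPass (ps.flatMap (fun q => [(true, opL), (false, q)]))
      = ps.flatMap (fun q => (true, opL) :: rest.foldl pvPass [(false, q)]) := by
  induction ps with
  | nil => simpa using pv_foldPass_nil rest
  | cons q qs ih =>
    have e1 : (q :: qs).flatMap (fun q => [(true, opL), (false, q)])
        = [(true, opL)] ++ [(false, q)] ++ qs.flatMap (fun q => [(true, opL), (false, q)]) := by
      simp
    rw [e1, pv_foldPass_append, pv_foldPass_append, pv_foldPass_true, ih]
    simp

theorem pv_G_cons (op : String) (rest : List String) (w : List Char) (hop : op.toList ≠ []) :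
    pvG (op :: rest) w = interTokL op.toList (pvG rest) (myParts op.toList w) := by
  rcases hmp : myParts op.toList w with _ | ⟨p, ps⟩
  · exact absurd hmp (pv_myParts_ne_nil _ _)
  · unfold pvG
    simp only [List.foldl_cons]
    have hp : pvPass [(false, w)] op
        = [(false, p)] ++ ps.flatMap (fun q => [(true, op.toList), (false, q)]) := by
      simp [pvPass, pv_pieces_eq w op hop p ps hmp]
    rw [hp, pv_foldPass_append, pv_fold_flat, pv_render_append, interTokL]
    congr 1
    clear hp hmp
    induction ps with
    | nil => rfl
    | cons q qs ih =>
      simp only [List.flatMap_cons, pv_render_append]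
      rw [ih]
      simp [pvRender]

-- ---- A-side: the inner while-loop computes the interleaved parts ----

theorem pv_loop_neg (sym : List Char) (hsym : sym ≠ []) (fsRest : List Char → List String → List String)
    (G1 : List Char → List String)
    (hG : ∀ p ws, ¬ sym <:+: p → fsRest p ws = ws ++ G1 p) (hnil : G1 [] = [])
    (word : List Char) (words : List String) (hx : ¬ 0 ≤ PySem.Chars.find word sym) :
    pvFsLoop sym false fsRest word words = words ++ interTokL sym G1 (myParts sym word) := by
  have hfree : ¬ sym <:+: word := by
    intro hinf
    exact hx ((PySem.Chars.find_nonneg_iff word sym).mpr hinf)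
  rw [pvFsLoop]
  simp only [hsym, hx, reduceDIte]
  rw [pv_myParts_neg sym word hsym hx, interTokL]
  rcases word with _ | ⟨c, cs⟩
  · simpa using hnil.symm
  · simp only [List.length_cons, Nat.zero_lt_succ, if_pos, Bool.false_eq_true]
    have := hG (c :: cs) words hfree
    simp_all

theorem pv_loop_step (sym : List Char) (hsym : sym ≠ []) (fsRest : List Char → List String → List String)
    (G1 : List Char → List String)
    (hG : ∀ p ws, ¬ sym <:+: p → fsRest p ws = ws ++ G1 p) (hnil : G1 [] = []) :
    ∀ (n : Nat) (word : List Char), word.length ≤ n → ∀ words,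
      pvFsLoop sym false fsRest word words = words ++ interTokL sym G1 (myParts sym word) := by
  intro n
  induction n with
  | zero =>
    intro word hw words
    have hword : word = [] := by cases word <;> simp_all
    subst hword
    exact pv_loop_neg sym hsym fsRest G1 hG hnil [] words
      (by rw [pv_find_nil sym hsym]; omega)
  | succ n ih =>
    intro word hw words
    by_cases hx : 0 ≤ PySem.Chars.find word sym
    · have hinf : sym <:+: word := (PySem.Chars.find_nonneg_iff word sym).mp hx
      have h1 : 1 ≤ sym.length := List.length_pos_iff.mpr hsym
      have h2 : sym.length ≤ word.length := hinf.length_le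
      have hlen : (PySem.Chars.len sym : Int) = sym.length := by simp [PySem.Chars.len_eq]
      rw [pvFsLoop]
      simp only [hsym, hx, reduceDIte]
      have e1 : PySem.Chars.slice word none (some (PySem.Chars.find word sym))
          = word.take (PySem.Chars.find word sym).toNat := by
        rw [PySem.Chars.slice_eq_listSlice, PySem.List.slice_to _ hx]
      have e2 : PySem.Chars.slice word (some (PySem.Chars.find word sym + PySem.Chars.len sym)) none
          = word.drop ((PySem.Chars.find word sym).toNat + sym.length) := by
        rw [PySem.Chars.slice_eq_listSlice, PySem.List.slice_from _ (by omega)]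
        congr 1
        omega
      rw [e1, e2]
      have hfree := pv_take_find_free sym word hsym hx
      rw [ih (word.drop ((PySem.Chars.find word sym).toNat + sym.length))
            (by simp only [List.length_drop]; omega)]
      rw [hG _ words hfree]
      rw [pv_myParts_pos sym word hsym hx, interTokL]
      rcases hmp : myParts sym (word.drop ((PySem.Chars.find word sym).toNat + sym.length))
        with _ | ⟨q, qs⟩
      · exact absurd hmp (pv_myParts_ne_nil _ _)
      · rw [interTokL]
        simp
    · exact pv_loop_neg sym hsym fsRest G1 hG hnil word words hx

-- ---- the main induction over the operator list ----

def pvNE (syms : List String) : Prop := ∀ s ∈ syms, s.toList ≠ []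

-- the last two symbols coincide (true of `operations`: it ends ")", ")")
def lastDup : List String → Prop
  | [] => True
  | [_] => True
  | [a, b] => a = b
  | _ :: b :: c :: t => lastDup (b :: c :: t)

-- at the innermost level the word no longer contains the (duplicated) last symbol
def pvNF (syms : List String) (word : List Char) : Prop :=
  match syms with
  | [s] => ¬ (s.toList <:+: word)
  | _ => True

theorem pv_main : ∀ (syms : List String), syms ≠ [] → pvNE syms → lastDup syms →
    ∀ (word : List Char) (words : List String), pvNF syms word →
      pvFs syms word words = words ++ pvG syms word := by
  intro syms
  induction syms with
  | nil => intro h; exact absurd rfl h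
  | cons sym rest ih =>
    intro _ hne hld word words hnf
    have hsym : sym.toList ≠ [] := hne sym List.mem_cons_self
    rcases rest with _ | ⟨r, rs⟩
    · -- innermost level: sym is the duplicated last symbol, word is sym-free
      have hfree : ¬ (sym.toList <:+: word) := hnf
      have hx : ¬ 0 ≤ PySem.Chars.find word sym.toList := by
        intro h0
        exact hfree ((PySem.Chars.find_nonneg_iff word sym.toList).mp h0)
      rw [pvFs, pvFsLoop]
      simp only [hsym, hx, reduceDIte, decide_true]
      have hG : pvG [sym] word = if word = [] then [] else [String.ofList word] := by
        unfold pvG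
        simp only [List.foldl_cons, List.foldl_nil, pvPass, List.flatMap_cons, List.flatMap_nil]
        rw [pv_pieces_eq word sym hsym word [] (pv_myParts_neg sym.toList word hsym hx)]
        rcases word with _ | ⟨c, cs⟩ <;> simp [pvRender]
      rw [hG]
      rcases word with _ | ⟨c, cs⟩ <;> simp
    · -- outer level: recurse into the remaining symbols on each part
      have hne' : pvNE (r :: rs) := fun s hs => hne s (List.mem_cons_of_mem _ hs)
      have hld' : lastDup (r :: rs) := by
        rcases rs with _ | ⟨a, t⟩
        · trivial
        · exact hld
      have hG : ∀ p ws, ¬ (sym.toList <:+: p) →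
          pvFs (r :: rs) p ws = ws ++ pvG (r :: rs) p := by
        intro p ws hfree
        apply ih (by simp) hne' hld'
        rcases rs with _ | ⟨a, t⟩
        · -- rest = [r]; lastDup (sym :: [r]) gives r = sym
          have hr : sym = r := hld
          show ¬ (r.toList <:+: p)
          rw [← hr]
          exact hfree
        · trivial
      have hnil : pvG (r :: rs) [] = [] := pv_G_nil (r :: rs) hne'
      rw [pvFs]
      simp only [decide_false, reduceCtorEq]
      have hloop := pv_loop_step sym.toList hsym (fun w ws => pvFs (r :: rs) w ws) (pvG (r :: rs))
        hG hnil word.length word (le_refl _) words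
      simp only at hloop
      rw [hloop, pv_G_cons sym (r :: rs) word hsym]

-- pvNF holds trivially for the full operator list (it has more than one element)
theorem pv_NF_ops (word : List Char) : pvNF pvOperations word := by
  unfold pvOperations pvNF
  trivial

theorem pv_per_word (w : String) :
    find_split w pvOperations = pvRender (pvOperations.foldl pvPass [(false, w.toList)]) := by
  rw [find_split, pv_main pvOperations (by simp [pvOperations])
    (by unfold pvNE pvOperations; decide) (by simp [lastDup, pvOperations])
    w.toList [] (pv_NF_ops w.toList)]
  simp [pvG]

-- ===== VERDICT (by name: the statement is the Claim_ definition above) =====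
theorem extended_split_spec : Claim_equal_extended_split := by
  intro vec _hdom _hpre
  unfold Spec_extended_split extended_split extended_split_alt
  apply PySem.List.foldl_congr_mem
  intro acc w _
  cases PySem.Str.pyGet? w 0 with
  | none => rfl
  | some c =>
    by_cases hc : c = '"'
    · simp [hc]
    · simp only [hc, if_false]
      rw [pv_per_word w]
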